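-- pv_equiv track=rewrite | github.com/RobbeBoeykens/Simulation-Group-work | ex11.py | make_cumulative_matrix
-- ===== SOURCE A (Python) =====
-- def make_cumulative_matrix(matrix):
--     cumulative_matrix = []
--
--     for row in matrix:
--         cumulative_row = []
--         running_sum = 0
--
--         for value in row:
--             running_sum += value
--             cumulative_row.append(running_sum)
--
--         cumulative_matrix.append(cumulative_row)
--
--     return cumulative_matrix
-- ===== SOURCE B (Python) =====
-- def make_cumulative_matrix(matrix):
--     return [[sum(row[:i+1]) for i in range(len(row))] for row in matrix]
-- ===== Notes on version B (the rewrite author's own statement) =====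
-- stated objective: simpler
-- what changed: Replaces the running-sum accumulator loops with a nested comprehension that recomputes each prefix sum independently via sum(row[:i+1]).
import Mathlib
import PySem

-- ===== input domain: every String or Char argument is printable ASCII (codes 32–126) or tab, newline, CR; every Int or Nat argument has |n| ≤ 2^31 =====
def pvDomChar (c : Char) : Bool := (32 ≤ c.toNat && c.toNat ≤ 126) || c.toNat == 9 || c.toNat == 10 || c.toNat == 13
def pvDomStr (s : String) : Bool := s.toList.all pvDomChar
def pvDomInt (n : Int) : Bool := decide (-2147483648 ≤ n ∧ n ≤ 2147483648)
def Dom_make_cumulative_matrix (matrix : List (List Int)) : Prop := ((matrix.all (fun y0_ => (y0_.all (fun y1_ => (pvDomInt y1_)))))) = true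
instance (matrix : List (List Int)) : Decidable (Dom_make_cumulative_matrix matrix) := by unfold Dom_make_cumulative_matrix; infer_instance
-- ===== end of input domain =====

-- B replaces the running-sum accumulator loops with a nested comprehension recomputing each prefix sum via sum(row[:i+1]); objective: simpler.


-- ===== PORT A =====
-- inner loop of A: running_sum/cumulative_row accumulator over the row
def pvRowA (row : List Int) : List Int :=
  (row.foldl (fun (st : Int × List Int) value => (st.1 + value, st.2 ++ [st.1 + value])) (0, [])).2

def make_cumulative_matrix (matrix : List (List Int)) : List (List Int) :=
  matrix.foldl (fun cumulative_matrix row => cumulative_matrix ++ [pvRowA row]) []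

-- ===== PORT B =====
-- [sum(row[:i+1]) for i in range(len(row))]
def pvRowB (row : List Int) : List Int :=
  (PySem.List.pyRange 0 (row.length : Int) 1).map
    (fun i => (PySem.List.slice row none (some (i + 1))).foldl (· + ·) 0)

def make_cumulative_matrix_alt (matrix : List (List Int)) : List (List Int) :=
  matrix.map pvRowB

-- ===== PRECONDITION & SPEC =====
def Spec_make_cumulative_matrix (matrix : List (List Int)) (out : List (List Int)) : Prop := out = make_cumulative_matrix_alt matrix
instance (matrix : List (List Int)) (out : List (List Int)) : Decidable (Spec_make_cumulative_matrix matrix out) := by unfold Spec_make_cumulative_matrix; infer_instance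

-- ===== CLAIM (what is proved, stated in full; the proofs are below) =====
def Claim_equal_make_cumulative_matrix : Prop := ∀ (matrix : List (List Int)), Dom_make_cumulative_matrix matrix → Spec_make_cumulative_matrix matrix (make_cumulative_matrix matrix)

-- ===== LEMMAS AND PROOFS =====

theorem pvRowA_inv (row : List Int) (s : Int) (acc : List Int) :
    (row.foldl (fun (st : Int × List Int) value => (st.1 + value, st.2 ++ [st.1 + value])) (s, acc)).2
      = acc ++ (List.range row.length).map (fun k => (row.take (k+1)).foldl (· + ·) s) := by
  induction row generalizing s acc with
  | nil => simp
  | cons v rest ih =>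
    simp only [List.foldl_cons, ih (s + v) (acc ++ [s + v]), List.length_cons]
    rw [List.range_succ_eq_map]
    simp [List.append_assoc, Function.comp]

theorem pvRowB_eq (row : List Int) :
    pvRowB row = (List.range row.length).map (fun k => (row.take (k+1)).foldl (· + ·) 0) := by
  unfold pvRowB
  rw [PySem.List.pyRange_one]
  simp only [sub_zero, Int.toNat_natCast, List.map_map]
  apply List.map_congr_left
  intro k hk
  simp only [Function.comp]
  rw [zero_add, show ((k : Int) + 1) = ((k + 1 : Nat) : Int) by push_cast; ring,
      PySem.List.slice_to_natCast]

theorem pvRow_eq (row : List Int) : pvRowA row = pvRowB row := by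
  rw [pvRowB_eq, pvRowA, pvRowA_inv]; simp

theorem foldl_append_singleton (m : List (List Int)) (acc : List (List Int)) :
    m.foldl (fun cm row => cm ++ [pvRowA row]) acc = acc ++ m.map pvRowA := by
  induction m generalizing acc with
  | nil => simp
  | cons r rest ih => simp [ih, List.append_assoc]

-- ===== VERDICT (by name: the statement is the Claim_ definition above) =====
theorem make_cumulative_matrix_spec : Claim_equal_make_cumulative_matrix := by
  intro matrix _
  show make_cumulative_matrix matrix = make_cumulative_matrix_alt matrix
  rw [make_cumulative_matrix, make_cumulative_matrix_alt, foldl_append_singleton]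
  simp [pvRow_eq]
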